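-- pv_equiv track=rewrite | github.com/benjaminsnorris/storyforge | scripts/lib/python/storyforge/hone.py | parse_registry_response
-- ===== SOURCE A (Python) =====
-- _REGISTRY_COLUMNS = {
--     'characters': ['id', 'name', 'role', 'aliases'],
--     'locations': ['id', 'name', 'aliases'],
--     'values': ['id', 'name', 'aliases'],
--     'mice-threads': ['id', 'name', 'type', 'aliases'],
--     'knowledge': ['id', 'name', 'aliases', 'category', 'origin'],
--     'physical-states': ['id', 'character', 'description', 'category', 'acquired', 'resolves', 'action_gating'],
-- }
--
-- def parse_registry_response(
--     response: str, domain: str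
-- ) -> tuple[list[dict[str, str]], list[tuple[str, str]]]:
--     """Parse an Opus registry-build response.
--
--     Returns:
--         (registry_rows, updates) where registry_rows is a list of dicts
--         keyed by the domain's columns, and updates is a list of
--         (scene_id, value_string) tuples from UPDATE lines.
--     """
--     if domain not in _REGISTRY_COLUMNS:
--         raise ValueError(f'Unknown reconciliation domain: {domain}')
--
--     columns = _REGISTRY_COLUMNS[domain]
--     rows: list[dict[str, str]] = []
--     updates: list[tuple[str, str]] = []
--     in_updates = False
--     header_seen = False
--
--     for line in response.split('\n'):
--         line = line.strip()
--         if not line: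
--             continue
--
--         # Check for UPDATES section marker
--         if line.upper() == 'UPDATES':
--             in_updates = True
--             continue
--
--         if in_updates:
--             if not line.startswith('UPDATE:'):
--                 continue
--             payload = line[len('UPDATE:'):].strip()
--             parts = payload.split('|', 1)
--             if len(parts) < 2:
--                 continue
--             scene_id = parts[0].strip()
--             value = parts[1].strip()
--             if scene_id:
--                 updates.append((scene_id, value))
--         else:
--             # Registry CSV parsing
--             fields = [f.strip() for f in line.split('|')]
--             # Skip header row
--             if not header_seen and len(fields) > 0 and fields[0] == 'id':
--                 header_seen = True
--                 continue
--             # Map fields to column names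
--             if len(fields) < len(columns):
--                 continue
--             row = {}
--             for i, col in enumerate(columns):
--                 row[col] = fields[i] if i < len(fields) else ''
--             if not row.get('id'):
--                 continue
--             rows.append(row)
--
--     return rows, updates
-- ===== SOURCE B (Python) =====
-- _REGISTRY_COLUMNS = {
--     'characters': ['id', 'name', 'role', 'aliases'],
--     'locations': ['id', 'name', 'aliases'],
--     'values': ['id', 'name', 'aliases'],
--     'mice-threads': ['id', 'name', 'type', 'aliases'],
--     'knowledge': ['id', 'name', 'aliases', 'category', 'origin'],
--     'physical-states': ['id', 'character', 'description', 'category', 'acquired', 'resolves', 'action_gating'],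
-- }
--
--
-- def _split_sections(lines):
--     """Split at the first 'UPDATES' marker: (registry lines, update lines)."""
--     for i, line in enumerate(lines):
--         if line.upper() == 'UPDATES':
--             return lines[:i], lines[i + 1:]
--     return lines, []
--
--
-- def _drop_header(lines):
--     """Remove the first line whose leading field is 'id', if any."""
--     for i, line in enumerate(lines):
--         if line.split('|')[0].strip() == 'id':
--             return lines[:i] + lines[i + 1:]
--     return lines
--
--
-- def _parse_row(line, columns):
--     fields = [f.strip() for f in line.split('|')]
--     if len(fields) >= len(columns) and fields[0]:
--         return dict(zip(columns, fields))
--     return None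
--
--
-- def _parse_update(line):
--     if line.startswith('UPDATE:'):
--         parts = line[len('UPDATE:'):].strip().split('|', 1)
--         if len(parts) > 1 and parts[0].strip():
--             return (parts[0].strip(), parts[1].strip())
--     return None
--
--
-- def parse_registry_response(
--     response: str, domain: str
-- ) -> tuple[list[dict[str, str]], list[tuple[str, str]]]:
--     if domain not in _REGISTRY_COLUMNS:
--         raise ValueError(f'Unknown reconciliation domain: {domain}')
--     columns = _REGISTRY_COLUMNS[domain]
--
--     lines = [s for s in (raw.strip() for raw in response.split('\n')) if s]
--     registry, tail = _split_sections(lines)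
--
--     rows = [r for r in (_parse_row(l, columns) for l in _drop_header(registry)) if r is not None]
--     updates = [u for u in map(_parse_update, tail) if u is not None]
--     return rows, updates
-- ===== Notes on version B (the rewrite author's own statement) =====
-- stated objective: simpler
-- what changed: Replaces the single-pass state machine (in_updates/header_seen flags) by a declarative decomposition: split the stripped non-empty lines at the first 'UPDATES' marker, delete the one header line from the registry section, then map each section through a small per-line parser (filter-map) instead of threading mutable flags.
-- outside the precondition, e.g. on parse_registry_response('a|b|c', 'bogus'): A raises ValueError, B raises ValueError
import Mathlib
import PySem

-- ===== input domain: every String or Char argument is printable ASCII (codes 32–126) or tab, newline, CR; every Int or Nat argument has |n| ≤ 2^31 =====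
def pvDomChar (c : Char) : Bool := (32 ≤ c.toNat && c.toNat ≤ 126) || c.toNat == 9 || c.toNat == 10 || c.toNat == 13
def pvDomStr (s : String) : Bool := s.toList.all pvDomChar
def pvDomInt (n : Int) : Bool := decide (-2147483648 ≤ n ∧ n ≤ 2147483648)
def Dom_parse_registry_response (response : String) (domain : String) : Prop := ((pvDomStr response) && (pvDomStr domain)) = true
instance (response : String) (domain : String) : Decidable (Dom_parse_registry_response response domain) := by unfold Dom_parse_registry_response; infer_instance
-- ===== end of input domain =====

-- B replaces A's single-pass in_updates/header_seen state machine by a declarative decomposition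
-- (split lines at the first 'UPDATES' marker, delete the header line, filter-map each section);
-- objective: simpler. Both raise ValueError on an unknown domain (excluded by Pre_).

-- ===== PORT A =====
-- the module constant _REGISTRY_COLUMNS (shared context of both implementations)
def pvRegistryColumns : PySem.Dict String (List String) :=
  PySem.Dict.ofList
    [("characters", ["id", "name", "role", "aliases"]),
     ("locations", ["id", "name", "aliases"]),
     ("values", ["id", "name", "aliases"]),
     ("mice-threads", ["id", "name", "type", "aliases"]),
     ("knowledge", ["id", "name", "aliases", "category", "origin"]),
     ("physical-states", ["id", "character", "description", "category", "acquired", "resolves", "action_gating"])]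

-- [f.strip() for f in line.split('|')]  (appears verbatim in both Pythons)
def pvFields (line : String) : List String :=
  (match PySem.Str.split? line "|" with | none => [] | some fs => fs).map PySem.Str.strip

-- A's loop body after the strip / empty-line 'continue'
def pvACore (columns : List String)
    (st : ((List (List (String × String))) × (List (String × String))) × Bool × Bool)
    (line : String) :
    ((List (List (String × String))) × (List (String × String))) × Bool × Bool :=
  if PySem.Str.upper line = "UPDATES" then (st.1, true, st.2.2)
  else if st.2.1 then
    (if PySem.Str.startswith line "UPDATE:" = false then st
     else
      let payload := PySem.Str.strip (PySem.Str.slice line (some 7) none)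
      let parts := match PySem.Str.splitMax? payload "|" 1 with | none => [] | some ps => ps
      if parts.length < 2 then st
      else
        let scene_id := PySem.Str.strip (parts.getD 0 "")
        let value := PySem.Str.strip (parts.getD 1 "")
        if scene_id = "" then st
        else ((st.1.1, st.1.2 ++ [(scene_id, value)]), st.2.1, st.2.2))
  else
    let fields := pvFields line
    if st.2.2 = false ∧ 0 < fields.length ∧ fields.getD 0 "" = "id" then (st.1, st.2.1, true)
    else if fields.length < columns.length then st
    else
      let row := (PySem.List.enumerate columns).foldl
        (fun d ic => d.insert ic.2 (if ic.1 < (fields.length : Int) then PySem.List.pyGetD fields ic.1 "" else ""))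
        PySem.Dict.empty
      match row.get? "id" with
      | none => st
      | some v => if v = "" then st else ((st.1.1 ++ [row.items], st.1.2), st.2.1, st.2.2)

-- one iteration of A's loop over a raw line
def pvAStep (columns : List String)
    (st : ((List (List (String × String))) × (List (String × String))) × Bool × Bool)
    (raw : String) :
    ((List (List (String × String))) × (List (String × String))) × Bool × Bool :=
  let line := PySem.Str.strip raw
  if line = "" then st else pvACore columns st line

def parse_registry_response (response : String) (domain : String) :
    (List (List (String × String))) × (List (String × String)) :=
  match pvRegistryColumns.get? domain with
  | none => ([], [])   -- Python raises ValueError here; excluded by Pre_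
  | some columns =>
    (((match PySem.Str.split? response "\n" with | none => [] | some ls => ls).foldl
        (pvAStep columns) (([], []), false, false)).1)

-- ===== PORT B =====
-- _split_sections: lines before / after the first 'UPDATES' marker
def pvSplitSections : List String → List String × List String
  | [] => ([], [])
  | l :: ls =>
    if PySem.Str.upper l = "UPDATES" then ([], ls)
    else
      let p := pvSplitSections ls
      (l :: p.1, p.2)

-- line.split('|')[0].strip()
def pvFirstField (line : String) : String :=
  PySem.Str.strip ((match PySem.Str.split? line "|" with | none => [] | some fs => fs).headD "")

-- _drop_header: remove the first line whose leading field is 'id'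
def pvDropHeader : List String → List String
  | [] => []
  | l :: ls => if pvFirstField l = "id" then ls else l :: pvDropHeader ls

-- _parse_row (dict(zip(columns, fields)) with the columns pairwise distinct)
def pvParseRow? (line : String) (columns : List String) : Option (List (String × String)) :=
  let fields := pvFields line
  if columns.length ≤ fields.length ∧ fields.headD "" ≠ "" then some (columns.zip fields) else none

-- _parse_update
def pvParseUpdate? (line : String) : Option (String × String) :=
  if PySem.Str.startswith line "UPDATE:" then
    let parts := match PySem.Str.splitMax? (PySem.Str.strip (PySem.Str.slice line (some 7) none)) "|" 1 with
      | none => [] | some ps => ps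
    if 1 < parts.length ∧ ¬ (PySem.Str.strip (parts.getD 0 "") = "") then
      some (PySem.Str.strip (parts.getD 0 ""), PySem.Str.strip (parts.getD 1 ""))
    else none
  else none

def parse_registry_response_alt (response : String) (domain : String) :
    (List (List (String × String))) × (List (String × String)) :=
  match pvRegistryColumns.get? domain with
  | none => ([], [])   -- Python raises ValueError here; excluded by Pre_
  | some columns =>
    let lines := ((match PySem.Str.split? response "\n" with | none => [] | some ls => ls).map
        PySem.Str.strip).filter (fun l => !(l == ""))
    let p := pvSplitSections lines
    ((pvDropHeader p.1).filterMap (fun l => pvParseRow? l columns),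
     p.2.filterMap pvParseUpdate?)

-- ===== PRECONDITION & SPEC =====
-- Pre_ excludes only the unknown domains, on which the Python (both A and B) raises ValueError.
def Pre_parse_registry_response (response : String) (domain : String) : Prop :=
  domain ∈ ["characters", "locations", "values", "mice-threads", "knowledge", "physical-states"]
instance (response : String) (domain : String) : Decidable (Pre_parse_registry_response response domain) := by unfold Pre_parse_registry_response; infer_instance

def pvWitness_parse_registry_response : String × String :=
  ("id|name|role|aliases\nc1|Bob|hero|B\nUPDATES\nUPDATE: s1|v", "characters")

def Spec_parse_registry_response (response : String) (domain : String) (out : (List (List (String × String))) × (List (String × String))) : Prop := out = parse_registry_response_alt response domain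
instance (response : String) (domain : String) (out : (List (List (String × String))) × (List (String × String))) : Decidable (Spec_parse_registry_response response domain out) := by unfold Spec_parse_registry_response; infer_instance

-- ===== CLAIM (what is proved, stated in full; the proofs are below) =====
def Claim_equal_parse_registry_response : Prop := ∀ (response : String) (domain : String), Dom_parse_registry_response response domain → Pre_parse_registry_response response domain → Spec_parse_registry_response response domain (parse_registry_response response domain)

-- ===== LEMMAS AND PROOFS =====

-- a line whose upper() is 'UPDATES' never starts with 'UPDATE:'
theorem pvMarkerNotUpdate (l : String) (h : PySem.Str.upper l = "UPDATES") :
    PySem.Str.startswith l "UPDATE:" = false := by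
  by_contra hne
  rw [Bool.not_eq_false] at hne
  have h2 : PySem.Chars.upper l.toList = "UPDATES".toList := by
    have := congrArg String.toList h
    simpa using this
  rw [PySem.Str.startswith, PySem.Chars.startswith] at hne
  obtain ⟨t, ht⟩ := (List.isPrefixOf_iff_prefix.mp hne)
  rw [PySem.Chars.upper] at h2
  rw [← ht, List.map_append] at h2
  have h3 : "UPDATE:".toList = ['U','P','D','A','T','E',':'] := by decide
  rw [h3] at h2
  simp [PySem.Chars.upperChar] at h2
  have h4 := h2.2.2.2.2.2.2.1
  revert h4; decide

-- the header test of A (on pvFields) and of B (pvFirstField) agree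
theorem pvHeaderCond (l : String) :
    (0 < (pvFields l).length ∧ (pvFields l).getD 0 "" = "id") ↔ pvFirstField l = "id" := by
  unfold pvFields pvFirstField
  cases h : PySem.Str.split? l "|" with
  | none => simp; decide
  | some fs =>
    cases fs with
    | nil => simp; decide
    | cons f t => simp

-- A's row dict equals dict(zip(columns, fields))
theorem pvZipAux (cols : List String) : ∀ (s : Nat) (fields : List String),
    s + cols.length ≤ fields.length →
    (PySem.List.enumerate cols (s : Int)).map
        (fun ic => (ic.2, if ic.1 < (fields.length : Int) then PySem.List.pyGetD fields ic.1 "" else ""))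
      = cols.zip (fields.drop s) := by
  induction cols with
  | nil => intro s fields h; simp [PySem.List.enumerate_nil]
  | cons c cs ih =>
    intro s fields h
    rw [PySem.List.enumerate_cons, List.map_cons]
    have hs : s < fields.length := by simp at h; omega
    have hlt : (s : Int) < (fields.length : Int) := by exact_mod_cast hs
    have hdrop : fields.drop s = fields[s] :: fields.drop (s + 1) := List.drop_eq_getElem_cons hs
    rw [hdrop]
    simp only [List.zip_cons_cons]
    have hcast : ((s : Int) + 1) = ((s + 1 : Nat) : Int) := by push_cast; ring
    rw [hcast, ih (s+1) fields (by simp at h ⊢; omega)]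
    simp [hlt, PySem.List.pyGetD_natCast, List.getD_eq_getElem?_getD, hs]

theorem pvRowEq (cols fields : List String) (hnd : cols.Nodup) (hlen : cols.length ≤ fields.length) :
    ((PySem.List.enumerate cols).foldl
        (fun d ic => d.insert ic.2 (if ic.1 < (fields.length : Int) then PySem.List.pyGetD fields ic.1 "" else ""))
        PySem.Dict.empty)
      = PySem.Dict.mk (cols.zip fields) := by
  apply PySem.Dict.ext
  rw [PySem.Dict.items_foldl_insert_fresh _ _ _ _
        (by intro a _; exact PySem.Dict.contains_empty _)
        (by rw [PySem.List.map_snd_enumerate]; exact hnd)]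
  have := pvZipAux cols 0 fields (by omega)
  simpa using this

-- updates phase: one line under in_updates = true
theorem pvUStep (cols : List String) (l : String) (rows : List (List (String × String)))
    (upds : List (String × String)) (hs : Bool) :
    pvACore cols ((rows, upds), true, hs)
      l = ((rows, upds ++ (pvParseUpdate? l).elim [] (fun u => [u])), true, hs) := by
  unfold pvACore pvParseUpdate?
  by_cases hm : PySem.Str.upper l = "UPDATES"
  · have hsw := pvMarkerNotUpdate l hm
    rw [PySem.Str.startswith] at hsw
    simp at hsw
    simp [hm, hsw]
  · by_cases hsw : PySem.Str.startswith l "UPDATE:" = true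
    · simp only [if_neg hm, hsw]
      set parts := (match PySem.Str.splitMax? (PySem.Str.strip (PySem.Str.slice l (some 7) none)) "|" 1 with
        | none => ([] : List String) | some ps => ps) with hparts
      by_cases hp : parts.length < 2
      · have h1 : ¬ 1 < parts.length := by omega
        simp [hp, h1]
      · have h1 : 1 < parts.length := by omega
        by_cases hsid : PySem.Str.strip (parts.getD 0 "") = ""
        all_goals
          simp only [List.getD_eq_getElem?_getD] at hsid
          simp [hp, h1, hsid]
    · rw [PySem.Str.startswith] at hsw
      simp at hsw
      simp [hm, hsw]

-- updates phase: A's loop with in_updates = true is B's filterMap over the tail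
theorem pvU (cols : List String) (ls : List String) :
    ∀ (rows : List (List (String × String))) (upds : List (String × String)) (hs : Bool),
    ls.foldl (pvACore cols) ((rows, upds), true, hs)
      = ((rows, upds ++ ls.filterMap pvParseUpdate?), true, hs) := by
  induction ls with
  | nil => intro rows upds hs; simp
  | cons l ls ih =>
    intro rows upds hs
    rw [List.foldl_cons, pvUStep, ih, List.filterMap_cons]
    cases pvParseUpdate? l <;> simp

-- registry phase: one non-header line maps through pvParseRow?
theorem pvRowStep (cs : List String) (hnd : ("id" :: cs).Nodup) (l : String)
    (rows : List (List (String × String))) (upds : List (String × String)) (hs : Bool)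
    (hm : ¬ PySem.Str.upper l = "UPDATES")
    (hnohdr : ¬ (hs = false ∧ 0 < (pvFields l).length ∧ (pvFields l).getD 0 "" = "id")) :
    pvACore ("id" :: cs) ((rows, upds), false, hs) l
      = ((rows ++ (pvParseRow? l ("id" :: cs)).elim [] (fun r => [r]), upds), false, hs) := by
  unfold pvACore pvParseRow?
  simp only [List.getD_eq_getElem?_getD] at hnohdr
  rw [if_neg hm, if_neg (by simp : ¬ ((false : Bool) = true))]
  rw [if_neg (by simpa using hnohdr)]
  by_cases hlen : (pvFields l).length < ("id" :: cs).length
  · rw [if_pos hlen, if_neg (by rintro ⟨h1, h2⟩; omega)]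
    simp
  · have hlen' : ("id" :: cs).length ≤ (pvFields l).length := Nat.not_lt.mp hlen
    rw [if_neg hlen, pvRowEq ("id" :: cs) (pvFields l) hnd hlen']
    cases hf : pvFields l with
    | nil => exfalso; rw [hf] at hlen'; simp at hlen'
    | cons f0 rest =>
      rw [hf] at hlen'
      simp only [List.zip_cons_cons, PySem.Dict.get?_mk_cons]
      have hcr : cs.length ≤ rest.length := by simpa using hlen'
      by_cases h0 : f0 = ""
      · simp [hcr, h0]
      · simp [hcr, h0]

-- registry phase: A's loop with in_updates = false is B's sectioned pipeline
theorem pvR (cs : List String) (hnd : ("id" :: cs).Nodup) (ls : List String) :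
    ∀ (rows : List (List (String × String))) (upds : List (String × String)) (hs : Bool),
    (ls.foldl (pvACore ("id" :: cs)) ((rows, upds), false, hs)).1
      = (rows ++ ((if hs then (pvSplitSections ls).1 else pvDropHeader (pvSplitSections ls).1).filterMap
            (fun l => pvParseRow? l ("id" :: cs))),
         upds ++ (pvSplitSections ls).2.filterMap pvParseUpdate?) := by
  induction ls with
  | nil => intro rows upds hs; cases hs <;> simp [pvSplitSections, pvDropHeader]
  | cons l ls ih =>
    intro rows upds hs
    rw [List.foldl_cons]
    by_cases hm : PySem.Str.upper l = "UPDATES"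
    · have hstep : pvACore ("id" :: cs) ((rows, upds), false, hs) l = ((rows, upds), true, hs) := by
        simp [pvACore, hm]
      rw [hstep, pvU]
      simp only [pvSplitSections, hm]
      cases hs <;> simp [pvDropHeader]
    · have hss1 : (pvSplitSections (l :: ls)).1 = l :: (pvSplitSections ls).1 := by
        simp [pvSplitSections, hm]
      have hss2 : (pvSplitSections (l :: ls)).2 = (pvSplitSections ls).2 := by
        simp [pvSplitSections, hm]
      rw [hss1, hss2]
      by_cases hid : 0 < (pvFields l).length ∧ (pvFields l).getD 0 "" = "id"
      · cases hs with
        | false =>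
          have hstep : pvACore ("id" :: cs) ((rows, upds), false, false) l = ((rows, upds), false, true) := by
            unfold pvACore
            rw [if_neg hm, if_neg (by simp : ¬ ((false : Bool) = true)), if_pos ⟨rfl, hid⟩]
          rw [hstep, ih rows upds true]
          have hdh : pvDropHeader (l :: (pvSplitSections ls).1) = (pvSplitSections ls).1 := by
            simp [pvDropHeader, (pvHeaderCond l).mp hid]
          simp [hdh]
        | true =>
          rw [pvRowStep cs hnd l rows upds true hm (fun h => by exact absurd h.1 (by decide)), ih]
          cases hr : pvParseRow? l ("id" :: cs) <;> simp [hr, List.append_assoc]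
      · have hdh : pvDropHeader (l :: (pvSplitSections ls).1) = l :: pvDropHeader (pvSplitSections ls).1 := by
          have : ¬ pvFirstField l = "id" := fun hc => hid ((pvHeaderCond l).mpr hc)
          simp [pvDropHeader, this]
        rw [pvRowStep cs hnd l rows upds hs hm (fun h => hid h.2), ih]
        cases hs with
        | false =>
          rw [hdh]
          cases hr : pvParseRow? l ("id" :: cs) <;> simp [hr, List.append_assoc]
        | true =>
          cases hr : pvParseRow? l ("id" :: cs) <;> simp [hr, List.append_assoc]

-- strip/skip normalisation: A's loop over raw lines is its core loop over the stripped non-empty lines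
theorem pvF (cols : List String) (ls : List String) :
    ∀ st, ls.foldl (pvAStep cols) st = ((ls.map PySem.Str.strip).filter (fun l => !(l == ""))).foldl (pvACore cols) st := by
  induction ls with
  | nil => intro st; rfl
  | cons l ls ih =>
    intro st
    by_cases h : PySem.Str.strip l = "" <;>
      simp [pvAStep, h, List.foldl_cons, ih]

theorem pvMain (cs : List String) (hnd : ("id" :: cs).Nodup) (lines : List String) :
    (lines.foldl (pvAStep ("id" :: cs)) ((([], []) : (List (List (String × String))) × (List (String × String))), false, false)).1
      = (let ls := (lines.map PySem.Str.strip).filter (fun l => !(l == ""));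
         ((pvDropHeader (pvSplitSections ls).1).filterMap (fun l => pvParseRow? l ("id" :: cs)),
          (pvSplitSections ls).2.filterMap pvParseUpdate?)) := by
  rw [pvF, pvR cs hnd]
  simp

-- ===== VERDICT (by name: the statement is the Claim_ definition above) =====
theorem parse_registry_response_spec : Claim_equal_parse_registry_response := by
  intro response domain _ hpre
  unfold Spec_parse_registry_response
  unfold Pre_parse_registry_response at hpre
  simp only [List.mem_cons, List.not_mem_nil, or_false] at hpre
  rcases hpre with h | h | h | h | h | h <;> subst h <;>
    simp only [parse_registry_response, parse_registry_response_alt, pvRegistryColumns] <;>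
    exact pvMain _ (by decide) _
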